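-- pv_equiv track=rewrite | github.com/sreelakshmisreeh/pyfringe | lcpy.py | get_image_LUT_swap_location
-- ===== SOURCE A (Python) =====
-- def get_image_LUT_swap_location(image_index_list):
--     """
--     Function creates buffer swap location index list and image index according to image_index_list pattern list.
--     DLPC350 stores two 24-bit frames in its internal memory buffer.This 48 bit-plane
--     display buffer allows the DLPC350 to send one 24-bit buffer to the DMD array while the second
--     buffer is filled from flash or streamed in through the 24-bit parallel RGB or FPD-link interface.
--     In streaming mode, the DMD array displays the previous 24-bit frame while the current frame fills the second 24-bit
--     frame of the display buffer. Once a 24-bit frame is displayed, the buffer rotates providing the next 24-bit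
--     frame to the DMD.
--     If there are only 2 images(24bits each), DLPC350 will fill buffer0, swap, then fill buffer1, but no projecting.
--     To get the correct order of pattern, need to do switch the order of pattern(set temp1 as entry0 and set temp0 as entry1).
--     If more than 2 images in LUT, DLPC350 only load half of the internal buffer, the projector plot same order as LUT.
--     :param image_index_list:  projector pattern sequence to create and project.
--     :type image_index_list: list
--     :return image_LUT_entries: user image index LUT list.
--     :return swap_location_list: list of indices to perform a buffer swap if true.
--     :rtype image_LUT_entries: list
--     :rtype swap_location_list: list
--     """
--     swap_location_list = [0] + [i for i in range(1, len(image_index_list)) if image_index_list[i] != image_index_list[i-1]]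
--     image_LUT_entries = [image_index_list[i] for i in swap_location_list]
--
--     if len(image_LUT_entries) == 2:
--         temp = image_LUT_entries[0:2].copy()
--         image_LUT_entries[0] = temp[1]
--         image_LUT_entries[1] = temp[0]
--
--     return image_LUT_entries, swap_location_list
-- ===== SOURCE B (Python) =====
-- def get_image_LUT_swap_location(image_index_list):
--     # Run-length decomposition: first encode the list as runs (value, length)
--     # with an outer loop whose inner while skips over each run, then derive the
--     # swap locations as prefix sums of the run lengths and the LUT entries as
--     # the run values; a two-run LUT is reversed.
--     values = []
--     lengths = []
--     i = 0
--     n = len(image_index_list)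
--     while i < n:
--         v = image_index_list[i]
--         j = i + 1
--         while j < n and image_index_list[j] == v:
--             j += 1
--         values.append(v)
--         lengths.append(j - i)
--         i = j
--     locs = [0]
--     for L in lengths[:-1]:
--         locs.append(locs[-1] + L)
--     if len(values) == 2:
--         values.reverse()
--     return values, locs
-- ===== Notes on version B (the rewrite author's own statement) =====
-- stated objective: alternative
-- what changed: A detects change points per index and then gathers the LUT entries by indexing; B run-length-encodes the list with a run-skipping two-level loop and derives the swap locations as prefix sums of the run lengths and the entries as the run values (reversing a two-run LUT).
-- outside the precondition, e.g. on get_image_LUT_swap_location([]): A raises IndexError, B returns ([], [0])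
import Mathlib
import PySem

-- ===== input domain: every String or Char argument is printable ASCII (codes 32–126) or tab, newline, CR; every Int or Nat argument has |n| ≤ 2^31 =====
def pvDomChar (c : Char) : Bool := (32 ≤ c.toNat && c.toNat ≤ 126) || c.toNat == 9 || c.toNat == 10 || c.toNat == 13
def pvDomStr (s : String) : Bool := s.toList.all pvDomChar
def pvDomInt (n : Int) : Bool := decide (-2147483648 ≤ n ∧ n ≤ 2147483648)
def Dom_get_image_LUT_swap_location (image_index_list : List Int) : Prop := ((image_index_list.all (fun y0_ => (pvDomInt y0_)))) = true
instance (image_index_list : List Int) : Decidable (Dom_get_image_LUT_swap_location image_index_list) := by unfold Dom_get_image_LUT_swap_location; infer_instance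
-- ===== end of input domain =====

-- B replaces A's change-detection-then-gather shape by a run-length encoding
-- (run-skipping two-level loop) followed by prefix sums of the run lengths;
-- same cost, a genuinely different decomposition.

-- ===== PORT A =====
def get_image_LUT_swap_location (image_index_list : List Int) : List Int × List Int :=
  let swap_location_list : List Int :=
    0 :: (PySem.List.pyRange 1 (PySem.List.len image_index_list)).filter
      (fun i => PySem.List.pyGetD image_index_list i 0 ≠ PySem.List.pyGetD image_index_list (i - 1) 0)
  let image_LUT_entries : List Int :=
    swap_location_list.map (fun i => PySem.List.pyGetD image_index_list i 0)
  if image_LUT_entries.length = 2 then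
    let temp := PySem.List.slice image_LUT_entries (some 0) (some 2)
    ([temp.getD 1 0, temp.getD 0 0], swap_location_list)
  else
    (image_LUT_entries, swap_location_list)

-- ===== PORT B =====
-- inner while loop: skip the leading run of value v, returning (run length - 1, remainder);
-- the Python indices i/j become the already-scanned prefix dropped from the list
def skipRun (v : Int) : List Int → Nat × List Int
  | [] => (0, [])
  | x :: rest =>
      if x = v then
        let p := skipRun v rest
        (p.1 + 1, p.2)
      else (0, x :: rest)

-- outer while loop: one run (value, length) per step; fuel = initial length only
-- makes the loop total, it is never exhausted on the actual call
def runScanF : Nat → List Int → List Int × List Nat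
  | 0, _ => ([], [])
  | _, [] => ([], [])
  | fuel + 1, v :: rest =>
      let p := skipRun v rest
      let q := runScanF fuel p.2
      (v :: q.1, (p.1 + 1) :: q.2)

-- the 'for L in lengths[:-1]: locs.append(locs[-1] + L)' loop (last = locs[-1])
def locsLoop (locs : List Int) (last : Int) : List Nat → List Int
  | [] => locs
  | L :: rest => locsLoop (locs ++ [last + (L : Int)]) (last + (L : Int)) rest

def get_image_LUT_swap_location_alt (image_index_list : List Int) : List Int × List Int :=
  let p := runScanF image_index_list.length image_index_list
  let values := p.1
  let locs := locsLoop [0] 0 p.2.dropLast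
  ((if values.length = 2 then values.reverse else values), locs)

-- ===== PRECONDITION & SPEC =====
-- Pre_ excludes only the empty list, on which Python A raises IndexError (image_index_list[0]).
def Pre_get_image_LUT_swap_location (image_index_list : List Int) : Prop := image_index_list ≠ []
instance (image_index_list : List Int) : Decidable (Pre_get_image_LUT_swap_location image_index_list) := by unfold Pre_get_image_LUT_swap_location; infer_instance
def pvWitness_get_image_LUT_swap_location : List Int := [1, 1, 2]

def Spec_get_image_LUT_swap_location (image_index_list : List Int) (out : List Int × List Int) : Prop := out = get_image_LUT_swap_location_alt image_index_list
instance (image_index_list : List Int) (out : List Int × List Int) : Decidable (Spec_get_image_LUT_swap_location image_index_list out) := by unfold Spec_get_image_LUT_swap_location; infer_instance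

-- ===== CLAIM (what is proved, stated in full; the proofs are below) =====
def Claim_equal_get_image_LUT_swap_location : Prop := ∀ (image_index_list : List Int), Dom_get_image_LUT_swap_location image_index_list → Pre_get_image_LUT_swap_location image_index_list → Spec_get_image_LUT_swap_location image_index_list (get_image_LUT_swap_location image_index_list)

-- ===== LEMMAS AND PROOFS =====

-- change-point scan (proof-side normal form shared by both ports)
def chgGo (prev : Int) (i : Int) : List Int → List Int × List Int
  | [] => ([], [])
  | x :: rest =>
    let p := chgGo x (i + 1) rest
    if x ≠ prev then (i :: p.1, x :: p.2) else p

-- pyRange 1 (n+1) lists 1..n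
lemma pyRange_one_shift (n : Nat) :
    PySem.List.pyRange 1 ((n : Int) + 1) = (List.range n).map (fun k : Nat => (k : Int) + 1) := by
  induction n with
  | zero => decide
  | succ m ih =>
      have h1 : (1 : Int) ≤ (m : Int) + 1 := by omega
      have h2 : ((m + 1 : Nat) : Int) + 1 = ((m : Int) + 1) + 1 := by push_cast; ring
      rw [h2, PySem.List.pyRange_one_succ_right h1, ih, List.range_succ]
      simp

-- the filter predicate of A's position list, relative to (prev :: rest)
def diffAt (prev : Int) (rest : List Int) (k : Nat) : Bool :=
  decide (rest.getD k 0 ≠ (prev :: rest).getD k 0)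

lemma filter_range_succ_diffAt (prev y : Int) (rest' : List Int) :
    (List.range (rest'.length + 1)).filter (diffAt prev (y :: rest'))
      = (if y ≠ prev then [0] else []) ++ ((List.range rest'.length).filter (diffAt y rest')).map Nat.succ := by
  rw [List.range_succ_eq_map, List.filter_cons, List.filter_map]
  have hhead : diffAt prev (y :: rest') 0 = decide (y ≠ prev) := by
    simp [diffAt]
  have htail : (diffAt prev (y :: rest')) ∘ Nat.succ = diffAt y rest' := by
    funext k; simp [diffAt, Function.comp]
  rw [hhead, htail]
  by_cases h : y = prev <;> simp [h]

-- characterisation of the change scan as filter/map over positions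
lemma chgGo_spec (rest : List Int) : ∀ (prev : Int) (i : Int),
    chgGo prev i rest =
      (((List.range rest.length).filter (diffAt prev rest)).map (fun k : Nat => (k : Int) + i),
       ((List.range rest.length).filter (diffAt prev rest)).map (fun k : Nat => rest.getD k 0)) := by
  induction rest with
  | nil => intro prev i; rfl
  | cons y rest' ih =>
      intro prev i
      show (let p := chgGo y (i + 1) rest';
            if y ≠ prev then (i :: p.1, y :: p.2) else p) = _
      rw [ih y (i + 1), List.length_cons, filter_range_succ_diffAt]
      have hm1 : ((((List.range rest'.length).filter (diffAt y rest')).map Nat.succ).map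
          (fun k : Nat => (k : Int) + i))
          = ((List.range rest'.length).filter (diffAt y rest')).map (fun k : Nat => (k : Int) + (i + 1)) := by
        rw [List.map_map]; apply List.map_congr_left; intro k _
        simp [Function.comp]; ring
      have hm2 : ((((List.range rest'.length).filter (diffAt y rest')).map Nat.succ).map
          (fun k : Nat => (y :: rest').getD k 0))
          = ((List.range rest'.length).filter (diffAt y rest')).map (fun k : Nat => rest'.getD k 0) := by
        rw [List.map_map]; apply List.map_congr_left; intro k _
        simp [Function.comp]
      by_cases h : y = prev
      · subst h
        have hny : ¬ (y ≠ y) := by simp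
        rw [if_neg hny, if_neg hny, List.nil_append, hm1, hm2]
      · rw [if_pos h, if_pos h, List.singleton_append, List.map_cons, List.map_cons, hm1, hm2]
        simp

-- common normal form of both ports on a nonempty list
def normForm (x0 : Int) (rest : List Int) : List Int × List Int :=
  let p := chgGo x0 1 rest
  let S : List Int := 0 :: p.1
  let E : List Int := x0 :: p.2
  if E.length = 2 then ([E.getD 1 0, E.getD 0 0], S) else (E, S)

-- ===== A equals the normal form =====
lemma A_char (x0 : Int) (rest : List Int) :
    get_image_LUT_swap_location (x0 :: rest) = normForm x0 rest := by
  simp only [get_image_LUT_swap_location, normForm]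
  rw [chgGo_spec]
  have hlen : PySem.List.len (x0 :: rest) = (rest.length : Int) + 1 := by
    simp [PySem.List.len]
  rw [hlen, pyRange_one_shift, List.filter_map]
  have hfc : List.filter
      ((fun i => decide (PySem.List.pyGetD (x0 :: rest) i 0 ≠ PySem.List.pyGetD (x0 :: rest) (i - 1) 0))
        ∘ (fun k : Nat => (k : Int) + 1)) (List.range rest.length)
      = (List.range rest.length).filter (diffAt x0 rest) := by
    apply List.filter_congr; intro k _
    have h1 : (k : Int) + 1 = ((k + 1 : Nat) : Int) := by push_cast; ring
    have h2 : (k : Int) + 1 - 1 = ((k : Nat) : Int) := by ring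
    have e1 : PySem.List.pyGetD (x0 :: rest) ((k : Int) + 1) 0 = rest.getD k 0 := by
      rw [h1, PySem.List.pyGetD_natCast, List.getD_cons_succ]
    have e2 : PySem.List.pyGetD (x0 :: rest) ((k : Int) + 1 - 1) 0 = (x0 :: rest).getD k 0 := by
      rw [h2, PySem.List.pyGetD_natCast]
    simp only [Function.comp, e1, e2, diffAt]
  rw [hfc]
  have hmap : List.map (fun i => PySem.List.pyGetD (x0 :: rest) i 0)
        (((List.range rest.length).filter (diffAt x0 rest)).map (fun k : Nat => (k : Int) + 1))
      = ((List.range rest.length).filter (diffAt x0 rest)).map (fun k : Nat => rest.getD k 0) := by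
    rw [List.map_map]; apply List.map_congr_left; intro k _
    have h1 : (k : Int) + 1 = ((k + 1 : Nat) : Int) := by push_cast; ring
    simp only [Function.comp, h1, PySem.List.pyGetD_natCast, List.getD_cons_succ]
  rw [List.map_cons, hmap]
  have h0 : PySem.List.pyGetD (x0 :: rest) 0 0 = x0 := by
    have h00 := PySem.List.pyGetD_ofNat' (x0 :: rest) 0 0
    simpa using h00
  rw [h0]
  set L := (List.range rest.length).filter (diffAt x0 rest) with hL
  set E := x0 :: L.map (fun k : Nat => rest.getD k 0) with hE
  by_cases hlen2 : E.length = 2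
  · rw [if_pos hlen2, if_pos hlen2]
    have hsl : PySem.List.slice E (some 0) (some 2) = E := by
      have h02 := PySem.List.slice_natCast E 0 2
      simpa using h02.trans (by rw [List.drop_zero]; exact List.take_of_length_le (by omega))
    rw [hsl]
  · rw [if_neg hlen2, if_neg hlen2]

-- ===== B equals the normal form =====

-- structural run-length encoding (proof-side counterpart of runScan)
def countEq (v : Int) : List Int → Nat
  | [] => 0
  | x :: rest => if x = v then countEq v rest + 1 else 0

def runsB : List Int → List Int × List Nat
  | [] => ([], [])
  | v :: rest =>
      let c := countEq v rest
      let p := runsB (rest.drop c)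
      (v :: p.1, (c + 1) :: p.2)
termination_by xs => xs.length
decreasing_by simp only [List.length_cons, List.length_drop]; omega

def psum (acc : Int) : List Nat → List Int
  | [] => []
  | L :: rest => (acc + (L : Int)) :: psum (acc + (L : Int)) rest

lemma skipRun_eq (v : Int) : ∀ (xs : List Int),
    skipRun v xs = (countEq v xs, xs.drop (countEq v xs))
  | [] => by simp [skipRun, countEq]
  | x :: rest => by
      by_cases h : x = v
      · subst h
        simp [skipRun, countEq, skipRun_eq x rest]
      · simp [skipRun, countEq, h]

lemma runScanF_eq : ∀ (fuel : Nat) (xs : List Int), xs.length ≤ fuel →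
    runScanF fuel xs = runsB xs
  | 0, xs, h => by
      have : xs = [] := List.length_eq_zero_iff.mp (Nat.le_zero.mp h)
      subst this
      simp [runScanF, runsB]
  | fuel + 1, [], _ => by simp [runScanF, runsB]
  | fuel + 1, v :: rest, h => by
      simp only [runScanF, skipRun_eq]
      have hlen : (rest.drop (countEq v rest)).length ≤ fuel := by
        simp only [List.length_drop]
        simp at h
        omega
      rw [runScanF_eq fuel (rest.drop (countEq v rest)) hlen]
      conv_rhs => rw [runsB]

-- the list splits as its leading run plus the remainder
lemma take_countEq (v : Int) : ∀ (xs : List Int), xs.take (countEq v xs) = List.replicate (countEq v xs) v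
  | [] => by simp [countEq]
  | x :: rest => by
      by_cases h : x = v
      · subst h
        simp [countEq, List.replicate_succ, take_countEq x rest]
      · simp [countEq, h]

lemma drop_countEq_head (v w : Int) (xs t : List Int)
    (h : xs.drop (countEq v xs) = w :: t) : w ≠ v := by
  induction xs generalizing t with
  | nil => simp [countEq] at h
  | cons x rest ih =>
      by_cases hx : x = v
      · subst hx
        rw [countEq, if_pos rfl, List.drop_succ_cons] at h
        exact ih _ h
      · simp only [countEq, if_neg hx, List.drop_zero] at h
        cases h
        exact hx

-- the change scan skips a leading run of the previous value
lemma chgGo_skip (v : Int) : ∀ (c : Nat) (i : Int) (tail : List Int),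
    chgGo v i (List.replicate c v ++ tail) = chgGo v (i + (c : Int)) tail
  | 0, i, tail => by simp
  | c + 1, i, tail => by
      rw [List.replicate_succ, List.cons_append]
      show (let p := chgGo v (i + 1) (List.replicate c v ++ tail);
            if v ≠ v then (i :: p.1, v :: p.2) else p) = _
      rw [if_neg (by simp)]
      rw [chgGo_skip v c (i + 1) tail]
      congr 1
      push_cast
      ring

lemma chgGo_snd_indep (prev i i' : Int) (xs : List Int) :
    (chgGo prev i xs).2 = (chgGo prev i' xs).2 := by
  rw [chgGo_spec, chgGo_spec]

lemma chgGo_fst_shift (prev i s : Int) (xs : List Int) :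
    (chgGo prev (i + s) xs).1 = ((chgGo prev i xs).1).map (· + s) := by
  rw [chgGo_spec, chgGo_spec]
  simp only [List.map_map]
  apply List.map_congr_left
  intro k _
  simp [Function.comp]
  ring

lemma psum_shift (s : Int) (L : List Nat) : ∀ (acc : Int),
    psum (s + acc) L = (psum acc L).map (· + s) := by
  induction L with
  | nil => intro acc; simp [psum]
  | cons l ls ih =>
      intro acc
      simp only [psum, List.map_cons]
      rw [show s + acc + (l : Int) = s + (acc + (l : Int)) by ring, ih (acc + (l : Int))]
      congr 1
      ring

lemma locsLoop_eq : ∀ (L : List Nat) (locs : List Int) (last : Int),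
    locsLoop locs last L = locs ++ psum last L
  | [], locs, last => by simp [locsLoop, psum]
  | l :: ls, locs, last => by
      rw [locsLoop, locsLoop_eq ls (locs ++ [last + (l : Int)]) (last + (l : Int))]
      simp [psum]

lemma runsB_snd_ne_nil (v : Int) (rest : List Int) : (runsB (v :: rest)).2 ≠ [] := by
  simp only [runsB]
  simp

-- main bridge: runsB's values are the change values, and the change positions
-- are the prefix sums of the run lengths (without the last)
lemma runs_chg : ∀ (n : Nat) (v : Int) (rest : List Int), rest.length ≤ n →
    (runsB (v :: rest)).1 = v :: (chgGo v 1 rest).2 ∧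
    (chgGo v 1 rest).1 = psum 0 ((runsB (v :: rest)).2.dropLast) := by
  intro n
  induction n with
  | zero =>
      intro v rest hlen
      have : rest = [] := List.length_eq_zero_iff.mp (Nat.le_zero.mp hlen)
      subst this
      constructor <;> simp [runsB, chgGo, countEq, psum]
  | succ m ih =>
      intro v rest hlen
      have hsplit : rest = List.replicate (countEq v rest) v ++ rest.drop (countEq v rest) := by
        conv_lhs => rw [← List.take_append_drop (countEq v rest) rest]
        rw [take_countEq]
      have hchg : chgGo v 1 rest = chgGo v (1 + (countEq v rest : Int)) (rest.drop (countEq v rest)) := by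
        conv_lhs => rw [hsplit]
        exact chgGo_skip v (countEq v rest) 1 (rest.drop (countEq v rest))
      have hruns : runsB (v :: rest)
          = (v :: (runsB (rest.drop (countEq v rest))).1,
             (countEq v rest + 1) :: (runsB (rest.drop (countEq v rest))).2) := by
        simp only [runsB]
      cases hdrop : rest.drop (countEq v rest) with
      | nil =>
          rw [hdrop] at hchg hruns
          rw [hruns, hchg]
          constructor <;> simp [runsB, chgGo, psum]
      | cons w rest'' =>
          have hwv : w ≠ v := drop_countEq_head v w rest rest'' hdrop
          have hlen'' : rest''.length ≤ m := by
            have h1 : (rest.drop (countEq v rest)).length = rest.length - countEq v rest :=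
              List.length_drop
            rw [hdrop] at h1
            simp at h1
            omega
          obtain ⟨iha, ihb⟩ := ih w rest'' hlen''
          rw [hdrop] at hchg hruns
          have hstep : chgGo v (1 + (countEq v rest : Int)) (w :: rest'')
              = ((1 + (countEq v rest : Int)) :: (chgGo w (1 + (countEq v rest : Int) + 1) rest'').1,
                 w :: (chgGo w (1 + (countEq v rest : Int) + 1) rest'').2) := by
            show (let p := chgGo w (1 + (countEq v rest : Int) + 1) rest'';
                  if w ≠ v then ((1 + (countEq v rest : Int)) :: p.1, w :: p.2) else p) = _
            rw [if_pos hwv]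
          have hsnd : (chgGo w (1 + (countEq v rest : Int) + 1) rest'').2 = (chgGo w 1 rest'').2 :=
            chgGo_snd_indep w _ 1 rest''
          have hfst : (chgGo w (1 + (countEq v rest : Int) + 1) rest'').1
              = ((chgGo w 1 rest'').1).map (· + (1 + (countEq v rest : Int))) := by
            have := chgGo_fst_shift w 1 (1 + (countEq v rest : Int)) rest''
            rw [← this]
            congr 1
            ring
          constructor
          · rw [hruns, hchg, hstep, hsnd, iha]
          · rw [hchg, hstep, hruns, hfst, ihb]
            have hne : (runsB (w :: rest'')).2 ≠ [] := runsB_snd_ne_nil w rest''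
            rw [List.dropLast_cons_of_ne_nil hne]
            simp only [psum]
            rw [show (0 : Int) + ((countEq v rest + 1 : Nat) : Int)
                  = (1 + (countEq v rest : Int)) + 0 by push_cast; ring,
                psum_shift (1 + (countEq v rest : Int)) _ 0]
            simp

lemma reverse_two (E : List Int) (h : E.length = 2) :
    E.reverse = [E.getD 1 0, E.getD 0 0] := by
  match E, h with
  | [a, b], _ => rfl

lemma B_char (x0 : Int) (rest : List Int) :
    get_image_LUT_swap_location_alt (x0 :: rest) = normForm x0 rest := by
  obtain ⟨ha, hb⟩ := runs_chg rest.length x0 rest (le_refl _)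
  simp only [get_image_LUT_swap_location_alt, normForm]
  rw [runScanF_eq (x0 :: rest).length (x0 :: rest) (le_refl _), ha, locsLoop_eq, ← hb]
  by_cases h2 : (x0 :: (chgGo x0 1 rest).2).length = 2
  · rw [if_pos h2, if_pos h2, reverse_two _ h2]
    rfl
  · rw [if_neg h2, if_neg h2]
    rfl

-- ===== VERDICT (by name: the statement is the Claim_ definition above) =====
theorem get_image_LUT_swap_location_spec : Claim_equal_get_image_LUT_swap_location := by
  intro xs _ hpre
  unfold Spec_get_image_LUT_swap_location
  cases xs with
  | nil => exact absurd rfl hpre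
  | cons x0 rest => rw [A_char, B_char]
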